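-- pv_equiv track=rewrite | github.com/jjz17/Tennis-Match-Outcome-Prediction | tennis-prediction-app.py | is_p1_set_winner
-- ===== SOURCE A (Python) =====
-- def is_p1_set_winner(last_game_pbp, num_games):
--
--     # If tiebreak decider
--     if num_games > 12:
--         p1_points = 0
--         p2_points = 0
--
--         switches = last_game_pbp.split('/')
--         p1_serves = switches[::2]
--         p2_serves = switches[1::2]
--         for switch in p1_serves:
--             p1_points += switch.count('A')
--             p1_points += switch.count('S')
--             p2_points += switch.count('R')
--             p2_points += switch.count('D')
--         for switch in p2_serves:
--             p2_points += switch.count('A')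
--             p2_points += switch.count('S')
--             p1_points += switch.count('R')
--             p1_points += switch.count('D')
--         return p1_points > p2_points
--     else:
--         s_points = 0
--         r_points = 0
--
--         s_points += last_game_pbp.count('A')
--         s_points += last_game_pbp.count('S')
--         r_points += last_game_pbp.count('R')
--         r_points += last_game_pbp.count('D')
--
--         # If p2 serves
--         if num_games % 2 == 0:
--             return r_points > s_points
--         # If p1 serves
--         else:
--             return s_points > r_points
-- ===== SOURCE B (Python) =====
-- def is_p1_set_winner(last_game_pbp, num_games):
--     # One left-to-right pass keeping a signed score (p1 minus p2) and, in the
--     # tiebreak case, a server sign that flips at each '/' segment boundary.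
--     if num_games > 12:
--         diff = 0
--         sign = 1
--         for c in last_game_pbp:
--             if c == '/':
--                 sign = -sign
--             elif c == 'A' or c == 'S':
--                 diff += sign
--             elif c == 'R' or c == 'D':
--                 diff -= sign
--         return diff > 0
--     diff = 0
--     for c in last_game_pbp:
--         if c == 'A' or c == 'S':
--             diff += 1
--         elif c == 'R' or c == 'D':
--             diff -= 1
--     if num_games % 2 == 0:
--         return diff < 0
--     return diff > 0
-- ===== Notes on version B (the rewrite author's own statement) =====
-- stated objective: alternative
-- what changed: Replaced A's split('/') + even/odd slice lists + per-segment substring counts with a single left-to-right character scan that keeps a signed score (p1 minus p2) and a server sign flipped at each '/', deciding the winner from the sign of one accumulator.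
import Mathlib
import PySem

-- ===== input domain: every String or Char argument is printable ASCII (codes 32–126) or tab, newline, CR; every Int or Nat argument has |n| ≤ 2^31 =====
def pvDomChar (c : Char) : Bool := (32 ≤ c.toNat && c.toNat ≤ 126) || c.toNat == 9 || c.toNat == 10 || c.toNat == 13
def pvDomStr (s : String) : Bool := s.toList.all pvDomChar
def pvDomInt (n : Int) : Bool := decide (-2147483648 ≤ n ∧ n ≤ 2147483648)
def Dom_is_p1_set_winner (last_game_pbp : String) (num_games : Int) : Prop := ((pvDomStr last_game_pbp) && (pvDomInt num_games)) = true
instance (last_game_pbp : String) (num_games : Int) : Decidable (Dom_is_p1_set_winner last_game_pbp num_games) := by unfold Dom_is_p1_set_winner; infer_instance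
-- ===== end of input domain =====

-- B replaces A's split('/') + even/odd segment slices + per-segment substring counts by a
-- single left-to-right character scan keeping a signed score and a server sign flipped at '/'
-- (objective: alternative — same O(n) cost, different algorithmic decomposition).

-- ===== PORT A =====
-- Python slicing switches[::2] / switches[1::2] never raises (step 2 ≠ 0), so slice? is
-- always `some …`; .getD [] only unwraps it.
def is_p1_set_winner (last_game_pbp : String) (num_games : Int) : Bool :=
  if num_games > 12 then
    let switches := PySem.Chars.splitOn last_game_pbp.toList ['/']
    let p1_serves := (PySem.List.slice? switches none none 2).getD []
    let p2_serves := (PySem.List.slice? switches (some 1) none 2).getD []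
    let pq1 := p1_serves.foldl (fun (pq : Int × Int) sw =>
      (pq.1 + (PySem.Chars.count sw ['A'] : Int) + (PySem.Chars.count sw ['S'] : Int),
       pq.2 + (PySem.Chars.count sw ['R'] : Int) + (PySem.Chars.count sw ['D'] : Int))) (0, 0)
    let pq2 := p2_serves.foldl (fun (pq : Int × Int) sw =>
      (pq.1 + (PySem.Chars.count sw ['R'] : Int) + (PySem.Chars.count sw ['D'] : Int),
       pq.2 + (PySem.Chars.count sw ['A'] : Int) + (PySem.Chars.count sw ['S'] : Int))) pq1
    decide (pq2.1 > pq2.2)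
  else
    let s_points : Int := (PySem.Chars.count last_game_pbp.toList ['A'] : Int)
      + (PySem.Chars.count last_game_pbp.toList ['S'] : Int)
    let r_points : Int := (PySem.Chars.count last_game_pbp.toList ['R'] : Int)
      + (PySem.Chars.count last_game_pbp.toList ['D'] : Int)
    if PySem.Int.mod num_games 2 = 0 then decide (r_points > s_points)
    else decide (s_points > r_points)

-- ===== PORT B =====
-- loop body of B's tiebreak scan: state = (signed score p1 − p2, current server sign)
def stepT (st : Int × Int) (c : Char) : Int × Int :=
  if c = '/' then (st.1, -st.2)
  else if c = 'A' ∨ c = 'S' then (st.1 + st.2, st.2)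
  else if c = 'R' ∨ c = 'D' then (st.1 - st.2, st.2)
  else st

-- loop body of B's non-tiebreak scan: state = signed score server − returner
def stepN (d : Int) (c : Char) : Int :=
  if c = 'A' ∨ c = 'S' then d + 1
  else if c = 'R' ∨ c = 'D' then d - 1
  else d

def is_p1_set_winner_alt (last_game_pbp : String) (num_games : Int) : Bool :=
  if num_games > 12 then
    let st := last_game_pbp.toList.foldl stepT (0, 1)
    decide (st.1 > 0)
  else
    let diff := last_game_pbp.toList.foldl stepN 0
    if PySem.Int.mod num_games 2 = 0 then decide (diff < 0)
    else decide (diff > 0)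

-- ===== PRECONDITION & SPEC =====
def Spec_is_p1_set_winner (last_game_pbp : String) (num_games : Int) (out : Bool) : Prop := out = is_p1_set_winner_alt last_game_pbp num_games
instance (last_game_pbp : String) (num_games : Int) (out : Bool) : Decidable (Spec_is_p1_set_winner last_game_pbp num_games out) := by unfold Spec_is_p1_set_winner; infer_instance

-- ===== CLAIM (what is proved, stated in full; the proofs are below) =====
def Claim_equal_is_p1_set_winner : Prop := ∀ (last_game_pbp : String) (num_games : Int), Dom_is_p1_set_winner last_game_pbp num_games → Spec_is_p1_set_winner last_game_pbp num_games (is_p1_set_winner last_game_pbp num_games)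

-- ===== LEMMAS AND PROOFS =====

-- Characterisation of PySem.Chars.splitOn on a single-character separator:
-- (first segment, remaining segments).
def splitChar (ch : Char) : List Char → List Char × List (List Char)
  | [] => ([], [])
  | c :: rest =>
    let p := splitChar ch rest
    if c = ch then ([], p.1 :: p.2) else (c :: p.1, p.2)

theorem splitOn_go_single (ch : Char) : ∀ (fuel : Nat) (l : List Char), l.length ≤ fuel →
    ∀ (cur : List Char) (acc : List (List Char)),
    PySem.Chars.splitOn.go [ch] fuel l cur acc
      = acc.reverse ++ (cur.reverse ++ (splitChar ch l).1) :: (splitChar ch l).2 := by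
  intro fuel
  induction fuel with
  | zero =>
    intro l hl cur acc
    have : l = [] := List.eq_nil_of_length_eq_zero (Nat.le_zero.mp hl)
    subst this
    simp [PySem.Chars.splitOn.go, splitChar]
  | succ fuel ih =>
    intro l hl cur acc
    cases l with
    | nil => simp [PySem.Chars.splitOn.go, splitChar]
    | cons c rest =>
      by_cases hc : c = ch
      · subst hc
        simp only [PySem.Chars.splitOn.go, List.isPrefixOf, beq_self_eq_true, Bool.true_and]
        simp only [List.length_cons] at hl
        simp [ih rest (by omega), splitChar]
      · have hpre : ([ch].isPrefixOf (c :: rest)) = false := by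
          simp [List.isPrefixOf]
          exact fun h => absurd h.symm hc
        simp only [PySem.Chars.splitOn.go, hpre]
        simp only [List.length_cons] at hl
        simp [ih rest (by omega), splitChar, hc]

theorem splitOn_single (ch : Char) (l : List Char) :
    PySem.Chars.splitOn l [ch] = (splitChar ch l).1 :: (splitChar ch l).2 := by
  unfold PySem.Chars.splitOn
  rw [splitOn_go_single ch _ _ (by omega)]
  simp

-- PySem.Chars.count on a single-character needle is List.count.
theorem count_go_single (c : Char) : ∀ (fuel : Nat) (l : List Char), l.length ≤ fuel →
    ∀ (acc : Nat), PySem.Chars.count.go [c] fuel l acc = acc + l.count c := by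
  intro fuel
  induction fuel with
  | zero =>
    intro l hl acc
    have : l = [] := List.eq_nil_of_length_eq_zero (Nat.le_zero.mp hl)
    subst this; simp [PySem.Chars.count.go]
  | succ fuel ih =>
    intro l hl acc
    cases l with
    | nil => simp [PySem.Chars.count.go]
    | cons h t =>
      simp only [List.length_cons] at hl
      by_cases hc : h = c
      · subst hc
        have hpre : ([h].isPrefixOf (h :: t)) = true := by simp [List.isPrefixOf]
        simp only [PySem.Chars.count.go, hpre, if_true]
        simp [ih t (by omega)]
        omega
      · have hpre : ([c].isPrefixOf (h :: t)) = false := by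
          simp [List.isPrefixOf]; exact fun hh => absurd hh (fun e => hc e.symm)
        simp only [PySem.Chars.count.go, hpre]
        simp [ih t (by omega), hc]

theorem count_single (l : List Char) (c : Char) :
    PySem.Chars.count l [c] = l.count c := by
  simp [PySem.Chars.count]
  rw [count_go_single c _ _ (by omega)]
  simp

-- Characterisation of xs[::2] and xs[1::2].
def evens {α : Type} : List α → List α
  | [] => []
  | [a] => [a]
  | a :: _ :: t => a :: evens t

def odds {α : Type} : List α → List α
  | [] => []
  | _ :: t => evens t

theorem fm_evens {α : Type} : ∀ (xs : List α),
    List.filterMap (fun k => xs[2*k]?) (List.range ((xs.length+1)/2)) = evens xs := by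
  intro xs
  induction xs using evens.induct with
  | case1 => simp [evens]
  | case2 a => simp [evens]
  | case3 a b t ih =>
    have hc : ((a :: b :: t).length + 1)/2 = (t.length+1)/2 + 1 := by
      simp only [List.length_cons]; omega
    rw [hc, List.range_succ_eq_map, List.filterMap_cons]
    simp only [Nat.mul_zero, List.getElem?_cons_zero, List.filterMap_map]
    have h2 : ∀ k : Nat, (a :: b :: t)[2*(k+1)]? = t[2*k]? := by
      intro k
      rw [show 2*(k+1) = (2*k+1)+1 by ring]
      simp
    simp only [Function.comp_def, h2, evens, ih]

theorem fm_odds {α : Type} : ∀ (xs : List α),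
    List.filterMap (fun k => xs[1+2*k]?) (List.range (xs.length/2)) = odds xs := by
  intro xs
  cases xs with
  | nil => simp [odds]
  | cons a t =>
    have hc : (a :: t).length / 2 = (t.length+1)/2 := by simp
    rw [hc]
    have h2 : ∀ k : Nat, (a :: t)[1+2*k]? = t[2*k]? := by
      intro k; rw [show 1+2*k = 2*k+1 by ring]; simp
    simp only [h2, odds]
    exact fm_evens t

theorem slice_evens {α : Type} (xs : List α) :
    (PySem.List.slice? xs none none 2).getD [] = evens xs := by
  simp only [PySem.List.slice?, PySem.List.sliceIndices]
  norm_num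
  have hn : (if 0 < xs.length then (((xs.length : Int) + 2 - 1)/2).toNat else 0) = (xs.length+1)/2 := by
    split <;> omega
  have hk : ∀ k : Nat, ((2 * (k : Int))).toNat = 2*k := by intro k; omega
  rw [hn]
  simp only [hk]
  exact fm_evens xs

theorem slice_odds {α : Type} (xs : List α) :
    (PySem.List.slice? xs (some 1) none 2).getD [] = odds xs := by
  simp only [PySem.List.slice?, PySem.List.sliceIndices]
  norm_num
  cases xs with
  | nil => simp [odds]
  | cons a t =>
    have hn : (if 1 < (a :: t).length then ((((a :: t).length : Int) - min 1 ((a :: t).length : Int) + 2 - 1)/2).toNat else 0)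
        = (a :: t).length / 2 := by
      simp only [List.length_cons]
      split <;> omega
    have hk : ∀ k : Nat, ((min 1 (((a :: t).length : Int)) + 2 * (k : Int))).toNat = 1 + 2*k := by
      intro k; simp only [List.length_cons]; omega
    rw [hn]
    simp only [hk]
    exact fm_odds _

-- point weights of a segment
def aAS (seg : List Char) : Int := (seg.count 'A' : Int) + (seg.count 'S' : Int)
def aRD (seg : List Char) : Int := (seg.count 'R' : Int) + (seg.count 'D' : Int)
def wSeg (seg : List Char) : Int := aAS seg - aRD seg

def altW : List (List Char) → Int
  | [] => 0
  | s :: ss => wSeg s - altW ss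

theorem foldA1 : ∀ (l : List (List Char)) (p q : Int),
    List.foldl (fun (pq : Int × Int) sw =>
      (pq.1 + (PySem.Chars.count sw ['A'] : Int) + (PySem.Chars.count sw ['S'] : Int),
       pq.2 + (PySem.Chars.count sw ['R'] : Int) + (PySem.Chars.count sw ['D'] : Int))) (p, q) l
      = (p + (l.map aAS).sum, q + (l.map aRD).sum) := by
  intro l
  induction l with
  | nil => simp
  | cons s t ih =>
    intro p q
    rw [List.foldl_cons]
    simp only []
    rw [ih]
    simp only [List.map_cons, List.sum_cons, count_single, aAS, aRD, Prod.mk.injEq]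
    constructor <;> ring

theorem foldA2 : ∀ (l : List (List Char)) (p q : Int),
    List.foldl (fun (pq : Int × Int) sw =>
      (pq.1 + (PySem.Chars.count sw ['R'] : Int) + (PySem.Chars.count sw ['D'] : Int),
       pq.2 + (PySem.Chars.count sw ['A'] : Int) + (PySem.Chars.count sw ['S'] : Int))) (p, q) l
      = (p + (l.map aRD).sum, q + (l.map aAS).sum) := by
  intro l
  induction l with
  | nil => simp
  | cons s t ih =>
    intro p q
    rw [List.foldl_cons]
    simp only []
    rw [ih]
    simp only [List.map_cons, List.sum_cons, count_single, aAS, aRD, Prod.mk.injEq]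
    constructor <;> ring

theorem wSeg_cons (c : Char) (l : List Char) :
    wSeg (c :: l) = (if c = 'A' ∨ c = 'S' then 1 else if c = 'R' ∨ c = 'D' then -1 else 0) + wSeg l := by
  simp only [wSeg, aAS, aRD, List.count_cons]
  by_cases hA : c = 'A' <;> by_cases hS : c = 'S' <;> by_cases hR : c = 'R' <;> by_cases hD : c = 'D' <;>
    simp [hA, hS, hR, hD] <;> omega

theorem foldT_spec : ∀ (cs : List Char) (d s : Int),
    (List.foldl stepT (d, s) cs).1 = d + s * altW ((splitChar '/' cs).1 :: (splitChar '/' cs).2) := by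
  intro cs
  induction cs with
  | nil => intro d s; simp [splitChar, altW, wSeg, aAS, aRD]
  | cons c t ih =>
    intro d s
    by_cases hsl : c = '/'
    · subst hsl
      have hstep : stepT (d, s) '/' = (d, -s) := by simp [stepT]
      rw [List.foldl_cons, hstep, ih]
      simp [splitChar, altW, wSeg, aAS, aRD]
      ring
    · by_cases hAS : c = 'A' ∨ c = 'S'
      · have hstep : stepT (d, s) c = (d + s, s) := by simp [stepT, hsl, hAS]
        rw [List.foldl_cons, hstep, ih]
        simp only [splitChar, if_neg hsl, altW, wSeg_cons, if_pos hAS]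
        ring
      · by_cases hRD : c = 'R' ∨ c = 'D'
        · have hstep : stepT (d, s) c = (d - s, s) := by simp [stepT, hsl, hAS, hRD]
          rw [List.foldl_cons, hstep, ih]
          simp only [splitChar, if_neg hsl, altW, wSeg_cons, if_neg hAS, if_pos hRD]
          ring
        · have hstep : stepT (d, s) c = (d, s) := by simp [stepT, hsl, hAS, hRD]
          rw [List.foldl_cons, hstep, ih]
          simp only [splitChar, if_neg hsl, altW, wSeg_cons, if_neg hAS, if_neg hRD]
          ring

theorem evens_cons {α : Type} (a : α) (t : List α) : evens (a :: t) = a :: odds t := by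
  cases t <;> rfl

theorem alt_sum : ∀ (segs : List (List Char)),
    altW segs = ((evens segs).map wSeg).sum - ((odds segs).map wSeg).sum := by
  intro segs
  induction segs with
  | nil => simp [altW, evens, odds]
  | cons a t ih =>
    simp only [altW, ih, evens_cons, odds, List.map_cons, List.sum_cons]
    ring

theorem sumW_eq : ∀ (l : List (List Char)),
    (l.map wSeg).sum = (l.map aAS).sum - (l.map aRD).sum := by
  intro l
  induction l with
  | nil => simp
  | cons a t ih => simp only [List.map_cons, List.sum_cons, ih, wSeg]; ring

theorem foldN_spec : ∀ (cs : List Char) (d : Int),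
    List.foldl stepN d cs = d + wSeg cs := by
  intro cs
  induction cs with
  | nil => intro d; simp [wSeg, aAS, aRD]
  | cons c t ih =>
    intro d
    rw [List.foldl_cons, wSeg_cons]
    by_cases hAS : c = 'A' ∨ c = 'S'
    · simp only [stepN, if_pos hAS, ih]; ring
    · by_cases hRD : c = 'R' ∨ c = 'D'
      · simp only [stepN, if_neg hAS, if_pos hRD, ih]; ring
      · simp only [stepN, if_neg hAS, if_neg hRD, ih]; ring

-- ===== VERDICT (by name: the statement is the Claim_ definition above) =====
theorem is_p1_set_winner_spec : Claim_equal_is_p1_set_winner := by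
  intro lg ng _
  unfold Spec_is_p1_set_winner is_p1_set_winner is_p1_set_winner_alt
  by_cases hng : ng > 12
  · simp only [if_pos hng]
    rw [splitOn_single '/', slice_evens, slice_odds, foldA1, foldA2, foldT_spec]
    rw [decide_eq_decide]
    have h := alt_sum ((splitChar '/' lg.toList).1 :: (splitChar '/' lg.toList).2)
    rw [sumW_eq, sumW_eq] at h
    rw [h]
    omega
  · simp only [if_neg hng, count_single, foldN_spec]
    split_ifs with hm
    · rw [decide_eq_decide]
      simp only [wSeg, aAS, aRD]
      omega
    · rw [decide_eq_decide]
      simp only [wSeg, aAS, aRD]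
      omega
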